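-- pv_equiv track=rewrite | github.com/KorkmazPolat/bitaksi | src/api/routes/documents.py | _normalize_with_map
-- ===== SOURCE A (Python) =====
-- def _normalize_with_map(text: str) -> tuple[str, list[int]]:
--     normalized_chars: list[str] = []
--     index_map: list[int] = []
--     previous_was_space = False
--
--     for idx, ch in enumerate(text):
--         lowered = ch.lower()
--         if lowered.isalnum():
--             normalized_chars.append(lowered)
--             index_map.append(idx)
--             previous_was_space = False
--             continue
--
--         if lowered.isspace() or lowered in "-_/.,:;!?()[]{}'\"":
--             if normalized_chars and not previous_was_space:
--                 normalized_chars.append(" ")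
--                 index_map.append(idx)
--             previous_was_space = True
--             continue
--
--         if normalized_chars and not previous_was_space:
--             normalized_chars.append(" ")
--             index_map.append(idx)
--         previous_was_space = True
--
--     if normalized_chars and normalized_chars[-1] == " ":
--         normalized_chars.pop()
--         index_map.pop()
--
--     return "".join(normalized_chars), index_map
-- ===== SOURCE B (Python) =====
-- def _normalize_with_map(text: str) -> tuple[str, list[int]]:
--     # Stage 1: keep only the alphanumeric characters (lowered) with their indices.
--     kept = [(i, c.lower()) for i, c in enumerate(text) if c.lower().isalnum()]
--     if not kept:
--         return "", []
--     # Stage 2: join kept chars, inserting one space (at index prev+1) at each gap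
--     # between consecutive kept positions.
--     chars = [kept[0][1]]
--     idxs = [kept[0][0]]
--     for (i, _), (j, d) in zip(kept, kept[1:]):
--         if j > i + 1:
--             chars.append(" ")
--             idxs.append(i + 1)
--         chars.append(d)
--         idxs.append(j)
--     return "".join(chars), idxs
-- ===== Notes on version B (the rewrite author's own statement) =====
-- stated objective: simpler
-- what changed: Replaces A's one-pass three-branch state machine (previous_was_space flag, separator classification, trailing-space pop) by two staged passes: filter the lowered alphanumeric characters with their indices, then join consecutive kept pairs via zip, inserting one space at index prev+1 wherever consecutive kept indices have a gap; no flag, no separator table, no final pop.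
import Mathlib
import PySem

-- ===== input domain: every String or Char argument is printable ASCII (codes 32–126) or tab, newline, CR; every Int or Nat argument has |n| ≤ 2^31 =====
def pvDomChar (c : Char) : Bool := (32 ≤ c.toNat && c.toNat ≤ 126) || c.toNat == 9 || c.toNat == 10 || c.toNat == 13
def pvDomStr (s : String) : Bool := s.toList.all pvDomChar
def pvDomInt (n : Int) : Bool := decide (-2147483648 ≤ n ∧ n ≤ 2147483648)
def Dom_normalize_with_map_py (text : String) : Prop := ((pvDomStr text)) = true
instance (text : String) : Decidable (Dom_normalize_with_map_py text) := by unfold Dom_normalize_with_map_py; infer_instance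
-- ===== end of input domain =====

-- B changes: instead of A's one-pass state machine (previous_was_space flag, separator
-- classification, trailing-space pop), B filters the alnum chars with their indices first,
-- then joins them, inserting one space (indexed prev+1) at each gap between consecutive
-- kept positions; objective: simpler.

-- ===== PORT A =====
def pvSepChars : List Char := "-_/.,:;!?()[]{}'\"".toList

def pvAStep (st : List Char × List Int × Bool) (p : Int × Char) : List Char × List Int × Bool :=
  let chars := st.1; let idxs := st.2.1; let prev := st.2.2
  let idx := p.1; let ch := p.2
  let lowered := PySem.Chars.lowerChar ch
  if PySem.Chars.isalnum lowered then
    (chars ++ [lowered], idxs ++ [idx], false)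
  else if PySem.Chars.isspace lowered || lowered ∈ pvSepChars then
    (if !chars.isEmpty && !prev then (chars ++ [' '], idxs ++ [idx], true)
     else (chars, idxs, true))
  else
    (if !chars.isEmpty && !prev then (chars ++ [' '], idxs ++ [idx], true)
     else (chars, idxs, true))

def normalize_with_map_py (text : String) : String × List Int :=
  let st := (PySem.List.enumerate text.toList).foldl pvAStep ([], [], false)
  let chars := st.1; let idxs := st.2.1
  if !chars.isEmpty && chars.getLast? == some ' ' then
    (String.ofList chars.dropLast, idxs.dropLast)
  else
    (String.ofList chars, idxs)

-- ===== PORT B =====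
-- the filter of Source B's stage-1 comprehension
def pvKeep (p : Int × Char) : Option (Int × Char) :=
  let low := PySem.Chars.lowerChar p.2
  if PySem.Chars.isalnum low then some (p.1, low) else none

-- one step of Source B's stage-2 loop over zip(kept, kept[1:])
def pvBStep (st : List Char × List Int) (pr : (Int × Char) × (Int × Char)) :
    List Char × List Int :=
  let i := pr.1.1; let j := pr.2.1; let d := pr.2.2
  let st' := if j > i + 1 then (st.1 ++ [' '], st.2 ++ [i + 1]) else st
  (st'.1 ++ [d], st'.2 ++ [j])

def normalize_with_map_py_alt (text : String) : String × List Int :=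
  let kept := (PySem.List.enumerate text.toList).filterMap pvKeep
  match kept with
  | [] => ("", [])
  | (i0, c0) :: rest =>
    let st := (kept.zip rest).foldl pvBStep ([c0], [i0])
    (String.ofList st.1, st.2)

-- ===== PRECONDITION & SPEC =====
def Spec_normalize_with_map_py (text : String) (out : String × List Int) : Prop := out = normalize_with_map_py_alt text
instance (text : String) (out : String × List Int) : Decidable (Spec_normalize_with_map_py text out) := by unfold Spec_normalize_with_map_py; infer_instance

-- ===== CLAIM (what is proved, stated in full; the proofs are below) =====
def Claim_equal_normalize_with_map_py : Prop := ∀ (text : String), Dom_normalize_with_map_py text → Spec_normalize_with_map_py text (normalize_with_map_py text)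

-- ===== LEMMAS AND PROOFS =====

-- Paired (char, index) characterization of A's loop tail, from a state with
-- chars empty iff e and flag prev.
def pvRest : List (Int × Char) → Bool → Bool → List (Char × Int)
  | [], _, _ => []
  | (i, c) :: t, e, prev =>
    let lc := PySem.Chars.lowerChar c
    if PySem.Chars.isalnum lc then (lc, i) :: pvRest t false false
    else if e || prev then pvRest t e true
    else (' ', i) :: pvRest t false true

-- A's trailing-space pop, on the paired list
def pvPop (l : List (Char × Int)) : List (Char × Int) :=
  match l.getLast? with
  | some p => if p.1 = ' ' then l.dropLast else l
  | none => l

-- Source B's stage-2 loop as a recursion on the kept list (p = previous kept index)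
def pvBody : Int → List (Int × Char) → List (Char × Int)
  | _, [] => []
  | p, (j, d) :: t => (if j > p + 1 then [(' ', p + 1), (d, j)] else [(d, j)]) ++ pvBody j t

def pvJoin (kept : List (Int × Char)) : List (Char × Int) :=
  match kept with
  | [] => []
  | (i, c) :: t => (c, i) :: pvBody i t

theorem pv_alnum_ne_space {c : Char} (h : PySem.Chars.isalnum c = true) : c ≠ ' ' := by
  intro he; subst he; exact absurd h (by decide)

theorem pv_pop_cons (x : Char × Int) (l : List (Char × Int)) (h : x.1 = ' ' → l ≠ []) :
    pvPop (x :: l) = x :: pvPop l := by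
  cases l with
  | nil =>
    by_cases hx : x.1 = ' '
    · exact absurd rfl (h hx)
    · simp [pvPop, hx]
  | cons y t =>
    have hlast : (x :: y :: t).getLast? = (y :: t).getLast? := by
      simp [List.getLast?_cons_cons]
    unfold pvPop
    rw [hlast]
    cases hq : (y :: t).getLast? with
    | none => simp at hq
    | some p =>
      by_cases hp : p.1 = ' ' <;> simp [hp, List.dropLast_cons_of_ne_nil]

theorem pv_A_fold (s : List (Int × Char)) :
    ∀ (pairs : List (Char × Int)) (prev : Bool),
    (((s.foldl pvAStep (pairs.map (·.1), pairs.map (·.2), prev))).1,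
     ((s.foldl pvAStep (pairs.map (·.1), pairs.map (·.2), prev))).2.1)
      = ((pairs ++ pvRest s pairs.isEmpty prev).map (·.1),
         (pairs ++ pvRest s pairs.isEmpty prev).map (·.2)) := by
  induction s with
  | nil => intro pairs prev; simp [pvRest]
  | cons p t ih =>
    intro pairs prev
    obtain ⟨i, c⟩ := p
    have hE : ∀ (x : Char × Int), (pairs ++ [x]).isEmpty = false := fun x => by simp
    simp only [List.foldl_cons]
    by_cases hk : PySem.Chars.isalnum (PySem.Chars.lowerChar c) = true
    · have ha : pvAStep (pairs.map (·.1), pairs.map (·.2), prev) (i, c)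
          = ((pairs ++ [(PySem.Chars.lowerChar c, i)]).map (·.1),
             (pairs ++ [(PySem.Chars.lowerChar c, i)]).map (·.2), false) := by
        simp [pvAStep, hk]
      rw [ha, ih]
      simp [pvRest, hk, hE]
    · by_cases hc : (!pairs.isEmpty && !prev) = true
      · have ha : pvAStep (pairs.map (·.1), pairs.map (·.2), prev) (i, c)
            = ((pairs ++ [(' ', i)]).map (·.1), (pairs ++ [(' ', i)]).map (·.2), true) := by
          by_cases hs : (PySem.Chars.isspace (PySem.Chars.lowerChar c)
              || PySem.Chars.lowerChar c ∈ pvSepChars) = true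
          · simp [pvAStep, hk, hs, hc]
          · simp [pvAStep, hk, hs, hc]
        rw [ha, ih]
        have hepv : (pairs.isEmpty || prev) = false := by
          cases hpe : pairs.isEmpty <;> cases prev <;> simp_all
        simp [pvRest, hk, hepv, hE]
      · have ha : pvAStep (pairs.map (·.1), pairs.map (·.2), prev) (i, c)
            = (pairs.map (·.1), pairs.map (·.2), true) := by
          by_cases hs : (PySem.Chars.isspace (PySem.Chars.lowerChar c)
              || PySem.Chars.lowerChar c ∈ pvSepChars) = true
          · simp [pvAStep, hk, hs, hc]
          · simp [pvAStep, hk, hs, hc]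
        rw [ha, ih]
        have hepv : (pairs.isEmpty || prev) = true := by
          cases hpe : pairs.isEmpty <;> cases prev <;> simp_all
        simp [pvRest, hk, hepv]

theorem pv_B_fold (rest : List (Int × Char)) :
    ∀ (prevp : Int × Char) (acc : List (Char × Int)),
    ((prevp :: rest).zip rest).foldl pvBStep (acc.map (·.1), acc.map (·.2))
      = ((acc ++ pvBody prevp.1 rest).map (·.1), (acc ++ pvBody prevp.1 rest).map (·.2)) := by
  induction rest with
  | nil => intro prevp acc; simp [pvBody]
  | cons q t ih =>
    intro prevp acc
    obtain ⟨j, d⟩ := q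
    rw [List.zip_cons_cons, List.foldl_cons]
    by_cases hg : j > prevp.1 + 1
    · have hb : pvBStep (acc.map (·.1), acc.map (·.2)) (prevp, (j, d))
          = ((acc ++ [(' ', prevp.1 + 1), (d, j)]).map (·.1),
             (acc ++ [(' ', prevp.1 + 1), (d, j)]).map (·.2)) := by
        simp [pvBStep, hg]
      rw [hb, ih]
      simp [pvBody, hg]
    · have hb : pvBStep (acc.map (·.1), acc.map (·.2)) (prevp, (j, d))
          = ((acc ++ [(d, j)]).map (·.1), (acc ++ [(d, j)]).map (·.2)) := by
        simp [pvBStep, hg]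
      rw [hb, ih]
      simp [pvBody, hg]

theorem pv_kept_head_ge (cs : List Char) :
    ∀ (j0 j : Int) (d : Char) (t : List (Int × Char)),
    (PySem.List.enumerate cs j0).filterMap pvKeep = (j, d) :: t → j0 ≤ j := by
  induction cs with
  | nil => intro j0 j d t h; simp [PySem.List.enumerate_nil] at h
  | cons c cs' ih =>
    intro j0 j d t h
    rw [PySem.List.enumerate_cons, List.filterMap_cons] at h
    by_cases hk : PySem.Chars.isalnum (PySem.Chars.lowerChar c) = true
    · simp [pvKeep, hk] at h
      omega
    · simp [pvKeep, hk] at h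
      have := ih (j0 + 1) j d t h
      omega

-- the joint state-machine bridge: A's tail (popped) equals B's join, for each of
-- A's three reachable states (start / just-after-alnum / after-separator-with-output)
theorem pv_bridge (cs : List Char) :
    ∀ (j0 : Int),
    (∀ prev, pvPop (pvRest (PySem.List.enumerate cs j0) true prev)
        = pvJoin ((PySem.List.enumerate cs j0).filterMap pvKeep)) ∧
    (pvPop (pvRest (PySem.List.enumerate cs j0) false false)
        = pvBody (j0 - 1) ((PySem.List.enumerate cs j0).filterMap pvKeep)) ∧
    (∀ k, pvPop ((' ', k) :: pvRest (PySem.List.enumerate cs j0) false true)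
        = (match (PySem.List.enumerate cs j0).filterMap pvKeep with
           | [] => []
           | (j, d) :: t => (' ', k) :: (d, j) :: pvBody j t)) := by
  induction cs with
  | nil =>
    intro j0
    refine ⟨fun prev => by simp [PySem.List.enumerate_nil, pvRest, pvPop, pvJoin],
            by simp [PySem.List.enumerate_nil, pvRest, pvPop, pvBody],
            fun k => by simp [PySem.List.enumerate_nil, pvRest, pvPop]⟩
  | cons c cs' ih =>
    intro j0
    have ih' := ih (j0 + 1)
    by_cases hk : PySem.Chars.isalnum (PySem.Chars.lowerChar c) = true
    · -- alnum head
      have hne := pv_alnum_ne_space hk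
      have hrest : ∀ e prev, pvRest (PySem.List.enumerate (c :: cs') j0) e prev
          = (PySem.Chars.lowerChar c, j0) :: pvRest (PySem.List.enumerate cs' (j0 + 1)) false false := by
        intro e prev
        rw [PySem.List.enumerate_cons]
        simp [pvRest, hk]
      have hkept : (PySem.List.enumerate (c :: cs') j0).filterMap pvKeep
          = (j0, PySem.Chars.lowerChar c) :: (PySem.List.enumerate cs' (j0 + 1)).filterMap pvKeep := by
        rw [PySem.List.enumerate_cons, List.filterMap_cons]
        simp [pvKeep, hk]
      have hpop : pvPop ((PySem.Chars.lowerChar c, j0) :: pvRest (PySem.List.enumerate cs' (j0 + 1)) false false)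
          = (PySem.Chars.lowerChar c, j0) :: pvPop (pvRest (PySem.List.enumerate cs' (j0 + 1)) false false) := by
        exact pv_pop_cons _ _ (fun hsp => absurd hsp hne)
      have hbody : pvPop (pvRest (PySem.List.enumerate cs' (j0 + 1)) false false)
          = pvBody j0 ((PySem.List.enumerate cs' (j0 + 1)).filterMap pvKeep) := by
        have := ih'.2.1
        simpa using this
      refine ⟨fun prev => ?_, ?_, fun k => ?_⟩
      · rw [hrest, hkept, hpop, hbody]; rfl
      · rw [hrest, hkept, hpop, hbody]
        simp [pvBody]
      · rw [hrest, hkept]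
        have h1 : pvPop ((' ', k) :: (PySem.Chars.lowerChar c, j0)
              :: pvRest (PySem.List.enumerate cs' (j0 + 1)) false false)
            = (' ', k) :: pvPop ((PySem.Chars.lowerChar c, j0)
              :: pvRest (PySem.List.enumerate cs' (j0 + 1)) false false) :=
          pv_pop_cons _ _ (fun _ => by simp)
        rw [h1, hpop, hbody]
    · -- separator head
      have hkept : (PySem.List.enumerate (c :: cs') j0).filterMap pvKeep
          = (PySem.List.enumerate cs' (j0 + 1)).filterMap pvKeep := by
        rw [PySem.List.enumerate_cons, List.filterMap_cons]
        simp [pvKeep, hk]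
      refine ⟨fun prev => ?_, ?_, fun k => ?_⟩
      · -- start state: nothing emitted, stay in start
        have hrest : pvRest (PySem.List.enumerate (c :: cs') j0) true prev
            = pvRest (PySem.List.enumerate cs' (j0 + 1)) true true := by
          rw [PySem.List.enumerate_cons]; simp [pvRest, hk]
        rw [hrest, hkept]; exact ih'.1 true
      · -- after-alnum state: emit (' ', j0), move to after-separator state
        have hrest : pvRest (PySem.List.enumerate (c :: cs') j0) false false
            = (' ', j0) :: pvRest (PySem.List.enumerate cs' (j0 + 1)) false true := by
          rw [PySem.List.enumerate_cons]; simp [pvRest, hk]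
        rw [hrest, hkept]
        rw [ih'.2.2 j0]
        cases hq : (PySem.List.enumerate cs' (j0 + 1)).filterMap pvKeep with
        | nil => simp [pvBody]
        | cons p t =>
          obtain ⟨j, d⟩ := p
          have hge := pv_kept_head_ge cs' (j0 + 1) j d t hq
          have hgt : j > j0 - 1 + 1 := by omega
          simp only [pvBody, hgt, if_pos]
          have : j0 - 1 + 1 = j0 := by omega
          rw [this]
          rfl
      · -- after-separator state: skip, stay
        have hrest : pvRest (PySem.List.enumerate (c :: cs') j0) false true
            = pvRest (PySem.List.enumerate cs' (j0 + 1)) false true := by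
          rw [PySem.List.enumerate_cons]; simp [pvRest, hk]
        rw [hrest, hkept]; exact ih'.2.2 k

-- the final pop of A, transported through the pairing
theorem pv_pop_map (r : List (Char × Int)) :
    (if !(r.map (·.1)).isEmpty && (r.map (·.1)).getLast? == some ' '
     then (String.ofList (r.map (·.1)).dropLast, (r.map (·.2)).dropLast)
     else (String.ofList (r.map (·.1)), r.map (·.2)))
    = (String.ofList ((pvPop r).map (·.1)), (pvPop r).map (·.2)) := by
  unfold pvPop
  cases hq : r.getLast? with
  | none =>
    have : r = [] := by cases r <;> simp_all
    subst this; simp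
  | some p =>
    have hne : r ≠ [] := by cases r <;> simp_all
    have h1 : (r.map (·.1)).getLast? = some p.1 := by
      rw [List.getLast?_map, hq]; rfl
    have hne1 : (r.map (·.1)).isEmpty = false := by simp [hne]
    by_cases hp : p.1 = ' '
    · simp [h1, hne1, hp, List.map_dropLast]
    · simp [h1, hne1, hp]

-- ===== VERDICT (by name: the statement is the Claim_ definition above) =====
theorem normalize_with_map_py_spec : Claim_equal_normalize_with_map_py := by
  intro text _
  simp only [Spec_normalize_with_map_py, normalize_with_map_py, normalize_with_map_py_alt]
  have hA := pv_A_fold (PySem.List.enumerate text.toList 0) [] false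
  simp only [List.map_nil, List.nil_append, List.isEmpty_nil] at hA
  have hbr := (pv_bridge text.toList 0).1 false
  cases hkept : (PySem.List.enumerate text.toList 0).filterMap pvKeep with
  | nil =>
    rw [hkept] at hbr
    simp only [pvJoin] at hbr
    -- A's result list pops to []
    rw [Prod.mk.injEq] at hA
    simp only [hA.1, hA.2]
    rw [pv_pop_map, hbr]
    rfl
  | cons p t =>
    obtain ⟨i0, c0⟩ := p
    rw [hkept] at hbr
    simp only [pvJoin] at hbr
    rw [Prod.mk.injEq] at hA
    simp only [hA.1, hA.2]
    rw [pv_pop_map, hbr]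
    have hB := pv_B_fold t (i0, c0) [(c0, i0)]
    simp only [List.map_cons, List.map_nil] at hB
    simp only [hB]
    rfl
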